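-- pv_equiv track=rewrite | github.com/Jmennius/vbox-video-merge | vbox-video-merge.py | read_vbox_sections
-- ===== SOURCE A (Python) =====
-- VBOX_PREAMBLE_SECTION = 'preamble'  # pseudo section that we use to save the preamble
--
-- def read_vbox_sections(vbox_lines: list[str]) -> dict[str, list[str]]:
--     """Groups vbox lines into sections
--
--     There is a special section 'preamble' which contains everything before the first section.
--     """
--     vbox_section_contents = {VBOX_PREAMBLE_SECTION: []}
--     current_section = VBOX_PREAMBLE_SECTION
--     for line in vbox_lines:
--         line = line.strip()
--         if line.startswith('[') and line.endswith(']'):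
--             current_section = line[1:-1]
--             vbox_section_contents[current_section] = list()
--         elif line:  # skip empty lines
--             vbox_section_contents[current_section].append(line)
--     return vbox_section_contents
-- ===== SOURCE B (Python) =====
-- VBOX_PREAMBLE_SECTION = 'preamble'  # pseudo section that we use to save the preamble
--
--
-- def _is_header(line):
--     return line.startswith('[') and line.endswith(']')
--
--
-- def _leading_block(lines):
--     """Non-empty lines before the first header."""
--     block = []
--     for line in lines:
--         if _is_header(line):
--             break
--         if line:
--             block.append(line)
--     return block
--
--
-- def _header_sections(lines):
--     """(name, content) for every header line; content = leading block after it."""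
--     sections = []
--     for i, line in enumerate(lines):
--         if _is_header(line):
--             sections.append((line[1:-1], _leading_block(lines[i + 1:])))
--     return sections
--
--
-- def read_vbox_sections(vbox_lines: list[str]) -> dict[str, list[str]]:
--     """Groups vbox lines into sections (two-pass: strip, then slice out each section's block)."""
--     stripped = [line.strip() for line in vbox_lines]
--     result = {VBOX_PREAMBLE_SECTION: _leading_block(stripped)}
--     for name, content in _header_sections(stripped):
--         result[name] = content
--     return result
-- ===== Notes on version B (the rewrite author's own statement) =====
-- stated objective: alternative
-- what changed: Replaces A's single-pass state machine (current-section pointer with reset-on-header mutation) by a two-pass decomposition: strip all lines once, then compute the preamble block and, for each header, independently slice out the block of non-empty lines up to the next header, building the dict by in-order insertion so duplicates overwrite.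
import Mathlib
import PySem

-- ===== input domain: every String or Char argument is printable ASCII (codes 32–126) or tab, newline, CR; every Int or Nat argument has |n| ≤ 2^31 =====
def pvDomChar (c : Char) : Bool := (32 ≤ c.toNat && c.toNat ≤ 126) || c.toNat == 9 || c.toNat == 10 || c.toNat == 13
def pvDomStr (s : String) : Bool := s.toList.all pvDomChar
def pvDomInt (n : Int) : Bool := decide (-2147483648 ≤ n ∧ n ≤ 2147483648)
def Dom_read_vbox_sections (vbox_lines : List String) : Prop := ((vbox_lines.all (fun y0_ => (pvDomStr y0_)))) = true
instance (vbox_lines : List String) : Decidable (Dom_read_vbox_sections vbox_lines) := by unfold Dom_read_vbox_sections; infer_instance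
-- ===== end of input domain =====

-- B replaces A's single-pass section state machine by a two-pass strip-then-slice decomposition (objective: alternative).

-- ===== PORT A =====
-- literal transliteration of A: a fold carrying (dict, current_section); strip, header test,
-- reset-on-header, append non-empty lines. current_section is always a key of the dict, so
-- `vbox_section_contents[current_section].append(line)` never raises: ported as Dict.modify.
def read_vbox_sections (vbox_lines : List String) : List (String × List String) :=
  let init : PySem.Dict String (List String) := PySem.Dict.empty.insert "preamble" []
  let st := vbox_lines.foldl
    (fun (st : PySem.Dict String (List String) × String) line =>
      let line := PySem.Str.strip line
      if PySem.Str.startswith line "[" && PySem.Str.endswith line "]" then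
        let cur := PySem.Str.slice line (some 1) (some (-1))
        (st.1.insert cur [], cur)
      else if line ≠ "" then
        (st.1.modify st.2 [] (fun v => v ++ [line]), st.2)
      else st)
    (init, "preamble")
  st.1.items

-- ===== PORT B =====
def pvIsHeader (line : String) : Bool :=
  PySem.Str.startswith line "[" && PySem.Str.endswith line "]"

-- _leading_block: the for/break loop as the obvious structural recursion
def pvLeadingBlock : List String → List String
  | [] => []
  | line :: rest =>
    if pvIsHeader line then []
    else if line ≠ "" then line :: pvLeadingBlock rest
    else pvLeadingBlock rest

-- _header_sections: `for i, line in enumerate(lines)` with `lines[i+1:]`, which at the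
-- index of `line` is exactly the tail `rest`; appending in order = structural recursion
def pvHeaderSections : List String → List (String × List String)
  | [] => []
  | line :: rest =>
    if pvIsHeader line then
      (PySem.Str.slice line (some 1) (some (-1)), pvLeadingBlock rest) :: pvHeaderSections rest
    else pvHeaderSections rest

def read_vbox_sections_alt (vbox_lines : List String) : List (String × List String) :=
  let stripped := vbox_lines.map PySem.Str.strip
  let result : PySem.Dict String (List String) :=
    PySem.Dict.empty.insert "preamble" (pvLeadingBlock stripped)
  let result := (pvHeaderSections stripped).foldl (fun d p => d.insert p.1 p.2) result
  result.items

-- ===== PRECONDITION & SPEC =====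
def Spec_read_vbox_sections (vbox_lines : List String) (out : List (String × List String)) : Prop := out = read_vbox_sections_alt vbox_lines
instance (vbox_lines : List String) (out : List (String × List String)) : Decidable (Spec_read_vbox_sections vbox_lines out) := by unfold Spec_read_vbox_sections; infer_instance

-- ===== CLAIM (what is proved, stated in full; the proofs are below) =====
def Claim_equal_read_vbox_sections : Prop := ∀ (vbox_lines : List String), Dom_read_vbox_sections vbox_lines → Spec_read_vbox_sections vbox_lines (read_vbox_sections vbox_lines)

-- ===== LEMMAS AND PROOFS =====

-- inserting the value a key already has changes nothing (keys unique)
theorem pv_insert_of_get?_eq_some {κ ν : Type} [BEq κ] [LawfulBEq κ]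
    (d : PySem.Dict κ ν) (k : κ) (v : ν)
    (hnd : d.keys.Nodup) (h : d.get? k = some v) : d.insert k v = d := by
  apply PySem.Dict.ext
  have hc : d.contains k = true := by
    rw [PySem.Dict.contains_eq_isSome_get?, h]; rfl
  rw [PySem.Dict.items_insert_of_contains d v hc]
  have hmap : ∀ p ∈ d.items, (if p.1 == k then (k, v) else p) = p := by
    intro p hp
    obtain ⟨a, b⟩ := p
    by_cases hpk : (a == k) = true
    · have hk : a = k := eq_of_beq hpk
      subst hk
      have hg : d.get? a = some b := PySem.Dict.get?_of_mem_items d hp hnd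
      rw [h] at hg
      have hv : v = b := by injection hg
      simp [hv]
    · simp [hpk]
  calc d.items.map (fun p => if p.1 == k then (k, v) else p)
      = d.items.map id := List.map_congr_left hmap
    _ = d.items := List.map_id d.items

-- A's loop body on an already-stripped line
def pvBodyS (st : PySem.Dict String (List String) × String) (line : String) :
    PySem.Dict String (List String) × String :=
  if PySem.Str.startswith line "[" && PySem.Str.endswith line "]" then
    let cur := PySem.Str.slice line (some 1) (some (-1))
    (st.1.insert cur [], cur)
  else if line ≠ "" then
    (st.1.modify st.2 [] (fun v => v ++ [line]), st.2)
  else st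

-- main invariant: A's fold over stripped lines, from a dict in which cur holds w,
-- equals B's in-order insertion of the header sections on top of cur's finished block
theorem pv_loop_eq (ls : List String) :
    ∀ (d : PySem.Dict String (List String)) (cur : String) (w : List String),
    d.keys.Nodup → d.get? cur = some w →
    (ls.foldl pvBodyS (d, cur)).1 =
      (pvHeaderSections ls).foldl (fun d p => d.insert p.1 p.2)
        (d.insert cur (w ++ pvLeadingBlock ls)) := by
  induction ls with
  | nil =>
    intro d cur w hnd hg
    simp [pvHeaderSections, pvLeadingBlock, pv_insert_of_get?_eq_some d cur w hnd hg]
  | cons line rest ih =>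
    intro d cur w hnd hg
    by_cases hh : (PySem.Str.startswith line "[" && PySem.Str.endswith line "]") = true
    · -- header line: section resets; cur's block is finished (empty leading block)
      have hI : pvIsHeader line = true := hh
      have hins : d.insert cur w = d := pv_insert_of_get?_eq_some d cur w hnd hg
      simp only [List.foldl_cons, pvBodyS, hh, if_pos]
      rw [ih _ _ []
        (PySem.Dict.nodup_keys_insert _ _ _ hnd)
        (PySem.Dict.get?_insert_self _ _ _)]
      simp only [pvHeaderSections, pvLeadingBlock, hI, if_pos, List.nil_append,
        List.append_nil, List.foldl_cons]
      rw [PySem.Dict.insert_insert_self, hins]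
    · have hI : pvIsHeader line = false := by
        unfold pvIsHeader; exact Bool.eq_false_iff.mpr hh
      by_cases he : line = ""
      · -- blank line: skipped everywhere
        subst he
        have hc0 : (PySem.Str.startswith "" "[" && PySem.Str.endswith "" "]") = false := by
          decide
        simp only [List.foldl_cons, pvBodyS, hc0, Bool.false_eq_true, if_false, ne_eq,
          not_true_eq_false]
        rw [ih d cur w hnd hg]
        simp [pvHeaderSections, pvLeadingBlock, hI]
      · -- content line: appended to cur's block
        simp only [List.foldl_cons, pvBodyS, hh, Bool.false_eq_true, if_false, he,
          ne_eq, not_false_iff, if_pos, PySem.Dict.modify]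
        have hget : d.getD cur [] = w := by
          rw [PySem.Dict.getD_eq_get?_getD, hg]; rfl
        rw [hget]
        rw [ih _ _ (w ++ [line])
          (PySem.Dict.nodup_keys_insert _ _ _ hnd)
          (PySem.Dict.get?_insert_self _ _ _)]
        simp [pvHeaderSections, pvLeadingBlock, hI, he,
          PySem.Dict.insert_insert_self]

-- ===== VERDICT (by name: the statement is the Claim_ definition above) =====
theorem read_vbox_sections_spec : Claim_equal_read_vbox_sections := by
  intro vbox_lines _
  unfold Spec_read_vbox_sections read_vbox_sections read_vbox_sections_alt
  have hfold : vbox_lines.foldl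
      (fun (st : PySem.Dict String (List String) × String) line =>
        let line := PySem.Str.strip line
        if PySem.Str.startswith line "[" && PySem.Str.endswith line "]" then
          let cur := PySem.Str.slice line (some 1) (some (-1))
          (st.1.insert cur [], cur)
        else if line ≠ "" then
          (st.1.modify st.2 [] (fun v => v ++ [line]), st.2)
        else st)
      (PySem.Dict.empty.insert "preamble" [], "preamble")
      = (vbox_lines.map PySem.Str.strip).foldl pvBodyS
          (PySem.Dict.empty.insert "preamble" [], "preamble") := by
    rw [List.foldl_map]
    rfl
  simp only [hfold]
  rw [pv_loop_eq (vbox_lines.map PySem.Str.strip)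
      (PySem.Dict.empty.insert "preamble" []) "preamble" []
      (PySem.Dict.nodup_keys_insert _ _ _ PySem.Dict.nodup_keys_empty)
      (PySem.Dict.get?_insert_self _ _ _)]
  rw [PySem.Dict.insert_insert_self]
  simp
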